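-- pv_equiv track=rewrite | github.com/raeunlee/Algorithm_Study | raeunlee/week_15/PGS_주식가격.py | solution
-- ===== SOURCE A (Python) =====
-- def solution(prices):
--     #모든 가격을 max값으로 세팅해준다
--     answer = [i for i in range(len(prices) -1, -1, -1)]
--     stack = [0]
--     #값이 떨어지는 시점을 찾아 수정해준다
--     for i in range(1, len(prices)):
--         while stack and prices[stack[-1]] > prices[i]:
--             tmp = stack.pop() #pop
--             answer[tmp] = i - tmp
--         stack.append(i)
--
--     return answer
-- ===== SOURCE B (Python) =====
-- def solution(prices):
--     n = len(prices)
--     answer = []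
--     for i in range(n):
--         res = n - 1 - i
--         for j in range(i + 1, n):
--             if prices[j] < prices[i]:
--                 res = j - i
--                 break
--         answer.append(res)
--     return answer
-- ===== Notes on version B (the rewrite author's own statement) =====
-- stated objective: simpler
-- what changed: Replaced the monotonic-stack single pass (default answers pre-filled from a reversed range, then patched via pops) by a direct per-index forward scan for the first strictly smaller later price.
import Mathlib
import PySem

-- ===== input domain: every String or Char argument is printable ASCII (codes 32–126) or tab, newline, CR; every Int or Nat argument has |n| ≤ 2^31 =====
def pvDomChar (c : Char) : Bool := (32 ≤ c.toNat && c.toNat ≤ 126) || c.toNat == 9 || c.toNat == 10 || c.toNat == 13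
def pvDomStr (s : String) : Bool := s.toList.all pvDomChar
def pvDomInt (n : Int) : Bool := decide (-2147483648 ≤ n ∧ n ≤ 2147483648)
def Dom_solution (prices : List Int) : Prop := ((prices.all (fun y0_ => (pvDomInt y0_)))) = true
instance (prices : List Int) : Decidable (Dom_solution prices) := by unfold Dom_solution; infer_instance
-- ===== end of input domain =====

-- B replaces A's monotonic-stack pass by a per-index forward scan for the first later strictly smaller price (simpler decomposition, not faster).

-- ===== PORT A =====
-- the Python while-loop: pop stack entries whose price is above prices[i], recording i - tmp
def solAWhile (prices : List Int) (i : Int) : List Int → List Int → (List Int × List Int)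
  | answer, [] => (answer, [])
  | answer, t :: rest =>
    if PySem.List.pyGetD prices t 0 > PySem.List.pyGetD prices i 0 then
      solAWhile prices i (PySem.List.pySetD answer t (i - t)) rest
    else (answer, t :: rest)

def solution (prices : List Int) : List Int :=
  let answer := PySem.List.pyRange (PySem.List.len prices - 1) (-1) (-1)
  ((PySem.List.pyRange 1 (PySem.List.len prices) 1).foldl
    (fun st i =>
      let r := solAWhile prices i st.1 st.2
      (r.1, i :: r.2)) (answer, [0])).1

-- ===== PORT B =====
-- the inner 'for j in range(i+1, n): if prices[j] < prices[i]: res = j - i; break' loop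
def solBScan (prices : List Int) (q : Int) (i j : Nat) : Int :=
  if h : j < prices.length then
    if prices[j] < q then (j : Int) - (i : Int)
    else solBScan prices q i (j + 1)
  else (prices.length : Int) - 1 - (i : Int)
termination_by prices.length - j

def solution_alt (prices : List Int) : List Int :=
  (List.range prices.length).map fun i => solBScan prices (prices.getD i 0) i (i + 1)

-- ===== PRECONDITION & SPEC =====
def Spec_solution (prices : List Int) (out : List Int) : Prop := out = solution_alt prices
instance (prices : List Int) (out : List Int) : Decidable (Spec_solution prices out) := by unfold Spec_solution; infer_instance

-- ===== CLAIM (what is proved, stated in full; the proofs are below) =====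
def Claim_equal_solution : Prop := ∀ (prices : List Int), Dom_solution prices → Spec_solution prices (solution prices)

-- ===== LEMMAS AND PROOFS =====

-- Nat-indexed model of A's loop (proof-side only)
def popN (prices : List Int) (i : Nat) : List Int → List Nat → (List Int × List Nat)
  | ans, [] => (ans, [])
  | ans, t :: rest =>
    if prices.getD t 0 > prices.getD i 0 then
      popN prices i (ans.set t ((i : Int) - (t : Int))) rest
    else (ans, t :: rest)

def stepN (prices : List Int) (st : List Int × List Nat) (i : Nat) : List Int × List Nat :=
  let r := popN prices i st.1 st.2
  (r.1, i :: r.2)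

def runA (prices : List Int) : Nat → (List Int × List Nat)
  | 0 => (PySem.List.pyRange ((prices.length : Int) - 1) (-1) (-1), [0])
  | k + 1 => stepN prices (runA prices k) (k + 1)

-- loop invariant after processing indices 1..k
def StkInv (prices : List Int) (k : Nat) (ans : List Int) (S : List Nat) : Prop :=
  ans.length = prices.length ∧
  S.Pairwise (fun a b => b < a) ∧
  (∀ j : Nat, j ∈ S ↔ j ≤ k ∧ ∀ m : Nat, j < m → m ≤ k → ¬ (prices.getD m 0 < prices.getD j 0)) ∧
  (∀ j : Nat, j < prices.length → (j ∈ S ∨ k < j) →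
      ans.getD j 0 = (prices.length : Int) - 1 - (j : Int)) ∧
  (∀ j : Nat, j ≤ k → j ∉ S → ans.getD j 0 = solBScan prices (prices.getD j 0) j (j + 1))

lemma scan_none (prices : List Int) (q : Int) (i : Nat) :
    ∀ j, (∀ m, j ≤ m → m < prices.length → ¬ prices.getD m 0 < q) →
    solBScan prices q i j = (prices.length : Int) - 1 - (i : Int) := by
  intro j
  induction j using solBScan.induct prices q with
  | case1 j hj hlt =>
    intro h
    have he : prices.getD j 0 = prices[j] := List.getD_eq_getElem _ _ hj
    exact absurd (he ▸ hlt) (h j le_rfl hj)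
  | case2 j hj hlt ih =>
    intro h
    rw [solBScan, dif_pos hj, if_neg hlt]
    exact ih (fun m hm hml => h m (by omega) hml)
  | case3 j hj =>
    intro _
    rw [solBScan, dif_neg hj]

lemma scan_found (prices : List Int) (q : Int) (i : Nat) :
    ∀ j k, j ≤ k → k < prices.length → prices.getD k 0 < q →
    (∀ m, j ≤ m → m < k → ¬ prices.getD m 0 < q) →
    solBScan prices q i j = (k : Int) - (i : Int) := by
  intro j
  induction j using solBScan.induct prices q with
  | case1 j hj hlt =>
    intro k hjk hk hkq hmin
    have hjeq : j = k := by
      by_contra hne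
      have he : prices.getD j 0 = prices[j] := List.getD_eq_getElem _ _ hj
      exact hmin j le_rfl (by omega) (he ▸ hlt)
    rw [solBScan, dif_pos hj, if_pos hlt, hjeq]
  | case2 j hj hlt ih =>
    intro k hjk hk hkq hmin
    have hne : j ≠ k := by
      intro he; subst he
      have he : prices.getD j 0 = prices[j] := List.getD_eq_getElem _ _ hj
      exact hlt (he ▸ hkq)
    rw [solBScan, dif_pos hj, if_neg hlt]
    exact ih k (by omega) hk hkq (fun m hm hml => hmin m (by omega) hml)
  | case3 j hj =>
    intro k hjk hk _ _
    omega

lemma solAWhile_eq (prices : List Int) (i : Nat) :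
    ∀ (S : List Nat) (ans : List Int),
    solAWhile prices (i : Int) ans (S.map Int.ofNat) =
      ((popN prices i ans S).1, (popN prices i ans S).2.map Int.ofNat) := by
  intro S
  induction S with
  | nil => intro ans; simp [solAWhile, popN]
  | cons t rest ih =>
    intro ans
    rw [List.map_cons, solAWhile, popN]
    simp only [Int.ofNat_eq_natCast, PySem.List.pyGetD_natCast, PySem.List.pySetD_natCast]
    by_cases hc : prices.getD t 0 > prices.getD i 0
    · rw [if_pos hc, if_pos hc]
      exact ih _
    · rw [if_neg hc, if_neg hc, List.map_cons]
      rfl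

lemma popN_spec (prices : List Int) (i : Nat) :
    ∀ (S : List Nat) (ans : List Int),
    S.Pairwise (fun a b => b < a ∧ prices.getD b 0 ≤ prices.getD a 0) →
    (∀ t ∈ S, t < ans.length) →
    ((popN prices i ans S).1.length = ans.length) ∧
    ((popN prices i ans S).2.Sublist S) ∧
    (∀ j, j ∈ (popN prices i ans S).2 ↔ j ∈ S ∧ ¬ prices.getD i 0 < prices.getD j 0) ∧
    (∀ j ∈ S, prices.getD i 0 < prices.getD j 0 →
        (popN prices i ans S).1.getD j 0 = (i : Int) - (j : Int)) ∧
    (∀ j, (j ∉ S ∨ ¬ prices.getD i 0 < prices.getD j 0) →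
        (popN prices i ans S).1.getD j 0 = ans.getD j 0) := by
  intro S
  induction S with
  | nil => intro ans _ _; simp [popN]
  | cons t rest ih =>
    intro ans hpw hlen
    have hpw' := (List.pairwise_cons.mp hpw).2
    have hhead := (List.pairwise_cons.mp hpw).1
    by_cases hc : prices.getD t 0 > prices.getD i 0
    · -- pop t
      have htnotin : t ∉ rest := fun hm => absurd (hhead t hm).1 (by omega)
      have htlen : t < ans.length := hlen t (List.mem_cons_self ..)
      have hlen' : ∀ u ∈ rest, u < (ans.set t ((i : Int) - (t : Int))).length := by
        simpa using fun u hu => hlen u (List.mem_cons_of_mem _ hu)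
      obtain ⟨ih1, ih2, ih3, ih4, ih5⟩ := ih (ans.set t ((i : Int) - (t : Int))) hpw' hlen'
      have hstep : popN prices i ans (t :: rest) =
          popN prices i (ans.set t ((i : Int) - (t : Int))) rest := by
        rw [popN, if_pos hc]
      rw [hstep]
      refine ⟨by simpa using ih1, (ih2.trans (List.sublist_cons_self ..)), ?_, ?_, ?_⟩
      · intro j
        rw [ih3 j]
        constructor
        · rintro ⟨hj, hq⟩; exact ⟨List.mem_cons_of_mem _ hj, hq⟩
        · rintro ⟨hj, hq⟩
          rcases List.mem_cons.mp hj with rfl | hj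
          · exact absurd hc hq
          · exact ⟨hj, hq⟩
      · intro j hj hq
        rcases List.mem_cons.mp hj with rfl | hj
        · rw [ih5 j (Or.inl htnotin)]
          have : (ans.set j ((i : Int) - (j : Int)))[j]? = some ((i : Int) - (j : Int)) :=
            List.getElem?_set_self (by exact htlen)
          simp [List.getD_eq_getElem?_getD, this]
        · exact ih4 j hj hq
      · intro j hj
        have hjt : j ≠ t := by
          rcases hj with hj | hj
          · exact fun he => hj (he ▸ List.mem_cons_self ..)
          · exact fun he => hj (he ▸ hc)
        have hset : (ans.set t ((i : Int) - (t : Int))).getD j 0 = ans.getD j 0 := by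
          simp [List.getD_eq_getElem?_getD, List.getElem?_set_ne (fun h => hjt h.symm)]
        rw [ih5 j ?_, hset]
        rcases hj with hj | hj
        · exact Or.inl (fun hm => hj (List.mem_cons_of_mem _ hm))
        · exact Or.inr hj
    · -- stop
      have hstep : popN prices i ans (t :: rest) = (ans, t :: rest) := by
        rw [popN, if_neg hc]
      rw [hstep]
      refine ⟨rfl, List.Sublist.refl _, ?_, ?_, fun j _ => rfl⟩
      · intro j
        constructor
        · intro hj
          refine ⟨hj, ?_⟩
          rcases List.mem_cons.mp hj with rfl | hj
          · exact hc
          · have := (hhead j hj).2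
            omega
        · exact fun h => h.1
      · intro j hj hq
        exfalso
        rcases List.mem_cons.mp hj with rfl | hj
        · exact hc hq
        · have := (hhead j hj).2; omega

lemma step_inv (prices : List Int) (k : Nat) (hk : k + 1 < prices.length)
    (ans : List Int) (S : List Nat) (h : StkInv prices k ans S) :
    StkInv prices (k + 1) (stepN prices (ans, S) (k + 1)).1 (stepN prices (ans, S) (k + 1)).2 := by
  obtain ⟨h1, h2, h3, h4, h5⟩ := h
  have hSle : ∀ j ∈ S, j ≤ k := fun j hj => ((h3 j).mp hj).1
  have hmono : S.Pairwise (fun a b => b < a ∧ prices.getD b 0 ≤ prices.getD a 0) := by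
    refine h2.imp_of_mem ?_
    intro a b ha hb hab
    refine ⟨hab, ?_⟩
    have := ((h3 b).mp hb).2 a hab (hSle a ha)
    omega
  have hlen' : ∀ t ∈ S, t < ans.length := fun t ht => by
    have := hSle t ht; omega
  obtain ⟨P1, P2, P3, P4, P5⟩ := popN_spec prices (k + 1) S ans hmono hlen'
  have hknotS : (k + 1) ∉ S := fun hm => by have := hSle _ hm; omega
  simp only [stepN]
  refine ⟨P1.trans h1, ?_, ?_, ?_, ?_⟩
  · refine List.pairwise_cons.mpr ⟨?_, h2.sublist P2⟩
    intro j hj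
    have := hSle j ((P3 j).mp hj).1
    omega
  · intro j
    constructor
    · intro hj
      rcases List.mem_cons.mp hj with rfl | hj
      · exact ⟨le_rfl, fun m hm hm' => by omega⟩
      · obtain ⟨hjS, hq⟩ := (P3 j).mp hj
        obtain ⟨hjk, hnd⟩ := (h3 j).mp hjS
        refine ⟨by omega, ?_⟩
        intro m hm hm'
        rcases Nat.lt_or_ge m (k + 1) with hmk | hmk
        · exact hnd m hm (by omega)
        · have : m = k + 1 := by omega
          exact this ▸ hq
    · rintro ⟨hjk, hnd⟩
      rcases Nat.eq_or_lt_of_le hjk with rfl | hjk'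
      · exact List.mem_cons_self ..
      · have hjS : j ∈ S := (h3 j).mpr ⟨by omega, fun m hm hm' => hnd m hm (by omega)⟩
        exact List.mem_cons_of_mem _ ((P3 j).mpr ⟨hjS, hnd (k + 1) (by omega) le_rfl⟩)
  · intro j hjn hj
    rcases hj with hj | hj
    · rcases List.mem_cons.mp hj with hjK | hj
      · rw [P5 j (Or.inl (by rw [hjK]; exact hknotS))]
        exact h4 j hjn (Or.inr (by omega))
      · obtain ⟨hjS, hq⟩ := (P3 j).mp hj
        rw [P5 j (Or.inr hq)]
        exact h4 j hjn (Or.inl hjS)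
    · have hjS : j ∉ S := fun hm => by have := hSle _ hm; omega
      rw [P5 j (Or.inl hjS)]
      exact h4 j hjn (Or.inr (by omega))
  · intro j hjk hj
    have hjne : j ≠ k + 1 := fun he => hj (he ▸ List.mem_cons_self ..)
    have hjk' : j ≤ k := by omega
    by_cases hjS : j ∈ S
    · have hq : prices.getD (k + 1) 0 < prices.getD j 0 := by
        by_contra hq
        exact hj (List.mem_cons_of_mem _ ((P3 j).mpr ⟨hjS, hq⟩))
      rw [P4 j hjS hq]
      have hnd := ((h3 j).mp hjS).2
      rw [scan_found prices (prices.getD j 0) j (j + 1) (k + 1) (by omega) hk hq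
        (fun m hm hml => hnd m (by omega) (by omega))]
    · have hjS' : j ∉ (popN prices (k + 1) ans S).2 :=
        fun hm => hjS ((P3 j).mp hm).1
      rw [P5 j (Or.inl hjS)]
      exact h5 j hjk' hjS

lemma runA_inv (prices : List Int) : ∀ k, k < prices.length →
    StkInv prices k (runA prices k).1 (runA prices k).2 := by
  intro k
  induction k with
  | zero =>
    intro hn
    refine ⟨?_, by simp [runA], ?_, ?_, ?_⟩
    · simp [runA, PySem.List.pyRange_neg_one]
    · intro j
      simp only [runA, List.mem_singleton]
      constructor
      · rintro rfl; exact ⟨le_rfl, fun m hm hm' => by omega⟩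
      · rintro ⟨hj, _⟩; omega
    · intro j hjn hj
      show (PySem.List.pyRange ((prices.length : Int) - 1) (-1) (-1)).getD j 0 = _
      rw [PySem.List.pyRange_neg_one]
      have hN : ((prices.length : Int) - 1 - (-1)).toNat = prices.length := by omega
      rw [hN]
      simp [List.getD_eq_getElem?_getD, hjn]
    · intro j hj hjS
      exact absurd (by omega : j = 0) (by simpa [runA] using hjS)
  | succ k ih =>
    intro hn
    have hinv := ih (by omega)
    have := step_inv prices k hn (runA prices k).1 (runA prices k).2 hinv
    simpa [runA] using this

lemma fold_bridge (prices : List Int) :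
    ∀ k : Nat,
    ((PySem.List.pyRange 1 ((k : Int) + 1) 1).foldl
      (fun st i =>
        let r := solAWhile prices i st.1 st.2
        (r.1, i :: r.2))
      (PySem.List.pyRange ((prices.length : Int) - 1) (-1) (-1), [(0 : Int)]))
    = ((runA prices k).1, (runA prices k).2.map Int.ofNat) := by
  intro k
  induction k with
  | zero =>
    rw [PySem.List.pyRange_one_eq_nil (by omega)]
    rfl
  | succ k ih =>
    have hsp : ((k + 1 : Nat) : Int) + 1 = ((k : Int) + 1) + 1 := by push_cast; ring
    rw [hsp, PySem.List.pyRange_one_succ_right (by omega), List.foldl_append, ih]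
    rw [List.foldl_cons, List.foldl_nil]
    show ((solAWhile prices ((k : Int) + 1) (runA prices k).1
          ((runA prices k).2.map Int.ofNat)).1,
        ((k : Int) + 1) :: (solAWhile prices ((k : Int) + 1) (runA prices k).1
          ((runA prices k).2.map Int.ofNat)).2) = _
    have hc : ((k : Int) + 1) = ((k + 1 : Nat) : Int) := by push_cast; ring
    rw [hc, solAWhile_eq prices (k + 1) (runA prices k).2 (runA prices k).1]
    show ((popN prices (k + 1) (runA prices k).1 (runA prices k).2).1,
        ((k + 1 : Nat) : Int) ::
          (popN prices (k + 1) (runA prices k).1 (runA prices k).2).2.map Int.ofNat) = _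
    simp [runA, stepN, Int.ofNat_eq_natCast]

lemma solution_eq_runA (prices : List Int) (hn : 0 < prices.length) :
    solution prices = (runA prices (prices.length - 1)).1 := by
  have hcast : (PySem.List.len prices : Int) = ((prices.length - 1 : Nat) : Int) + 1 := by
    rw [PySem.List.len_eq]; omega
  show ((PySem.List.pyRange 1 (PySem.List.len prices) 1).foldl
    (fun st i =>
      let r := solAWhile prices i st.1 st.2
      (r.1, i :: r.2))
    (PySem.List.pyRange (PySem.List.len prices - 1) (-1) (-1), [0])).1 = _
  rw [PySem.List.len_eq] at hcast ⊢
  rw [show PySem.List.pyRange 1 ((prices.length : Int)) 1 =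
      PySem.List.pyRange 1 (((prices.length - 1 : Nat) : Int) + 1) 1 from by rw [hcast]]
  rw [fold_bridge prices (prices.length - 1)]

lemma runA_final (prices : List Int) (hn : 0 < prices.length) :
    (runA prices (prices.length - 1)).1 = solution_alt prices := by
  obtain ⟨h1, h2, h3, h4, h5⟩ := runA_inv prices (prices.length - 1) (by omega)
  apply List.ext_getElem
  · rw [h1]; simp [solution_alt]
  · intro j hjl hjr
    have hjn : j < prices.length := by rwa [h1] at hjl
    have hval : (runA prices (prices.length - 1)).1[j] =
        (runA prices (prices.length - 1)).1.getD j 0 :=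
      (List.getD_eq_getElem _ _ hjl).symm
    have hrhs : (solution_alt prices)[j] =
        solBScan prices (prices.getD j 0) j (j + 1) := by
      simp [solution_alt]
    rw [hval, hrhs]
    by_cases hjS : j ∈ (runA prices (prices.length - 1)).2
    · rw [h4 j hjn (Or.inl hjS)]
      have hnd := ((h3 j).mp hjS).2
      rw [scan_none prices (prices.getD j 0) j (j + 1)
        (fun m hm hml => hnd m (by omega) (by omega))]
    · exact h5 j (by omega) hjS


-- ===== VERDICT (by name: the statement is the Claim_ definition above) =====
theorem solution_spec : Claim_equal_solution := by
  intro prices _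
  unfold Spec_solution
  rcases Nat.eq_zero_or_pos prices.length with h0 | hn
  · rw [List.length_eq_zero_iff.mp h0]; rfl
  · rw [solution_eq_runA prices hn, runA_final prices hn]
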